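-- pv_equiv track=rewrite | github.com/cc-pine/pdfplumber_tablefinder | table.py | naive_overlap_bboxes
-- ===== SOURCE A (Python) =====
-- def naive_overlap_bboxes(bbox_list1, bbox_list2):
--     overlap_list = []
--     for i, bbox1 in enumerate(bbox_list1):
--         x1_b1, y1_b1, x2_b1, y2_b1 = bbox1
--         for j, bbox2 in enumerate(bbox_list2):
--             x1_b2, y1_b2, x2_b2, y2_b2 = bbox2
--             if (x1_b1 <= x2_b2 and x2_b1 >= x1_b2) and (
--                 y1_b1 <= y2_b2 and y2_b1 >= y1_b2
--             ):
--                 overlap_list.append((i, j))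
--     return overlap_list
-- ===== SOURCE B (Python) =====
-- def naive_overlap_bboxes(bbox_list1, bbox_list2):
--     # Sort the second list by its x1 once; for each box of the first list scan only
--     # the prefix whose x1 <= box.x2 (early break), then restore index order.
--     indexed2 = sorted(enumerate(bbox_list2), key=lambda t: t[1][0])
--     out = []
--     for i, (x1, y1, x2, y2) in enumerate(bbox_list1):
--         js = []
--         for j, (a1, b1, a2, b2) in indexed2:
--             if a1 > x2:
--                 break
--             if x1 <= a2 and y1 <= b2 and y2 >= b1:
--                 js.append(j)
--         js.sort()
--         out.extend((i, j) for j in js)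
--     return out
-- ===== Notes on version B (the rewrite author's own statement) =====
-- stated objective: alternative
-- what changed: B sorts the second list by x1 once and, for each first-list box, scans only the prefix with x1 <= box.x2 (early break), collecting matching indices and re-sorting them, instead of A's full nested scan of every pair.
import Mathlib
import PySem

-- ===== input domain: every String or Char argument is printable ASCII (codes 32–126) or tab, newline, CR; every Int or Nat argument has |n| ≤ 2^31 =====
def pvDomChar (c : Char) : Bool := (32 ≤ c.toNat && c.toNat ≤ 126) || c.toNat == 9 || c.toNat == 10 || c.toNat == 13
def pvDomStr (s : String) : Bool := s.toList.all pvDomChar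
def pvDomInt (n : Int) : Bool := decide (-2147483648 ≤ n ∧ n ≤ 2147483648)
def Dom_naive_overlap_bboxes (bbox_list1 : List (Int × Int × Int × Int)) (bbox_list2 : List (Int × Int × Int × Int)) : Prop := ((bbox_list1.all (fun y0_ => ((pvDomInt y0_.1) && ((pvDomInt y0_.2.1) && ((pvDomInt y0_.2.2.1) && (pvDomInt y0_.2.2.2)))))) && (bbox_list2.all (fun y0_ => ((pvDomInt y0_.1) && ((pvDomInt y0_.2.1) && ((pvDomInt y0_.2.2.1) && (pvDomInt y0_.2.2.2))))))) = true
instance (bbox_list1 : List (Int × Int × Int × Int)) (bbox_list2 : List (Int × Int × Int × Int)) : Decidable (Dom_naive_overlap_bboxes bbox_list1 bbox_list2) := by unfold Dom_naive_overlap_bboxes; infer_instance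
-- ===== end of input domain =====

-- ===== PORT A =====
-- B rewrites A with an x1-sorted index of the second list and prefix pruning; same return value (objective: alternative).
def naive_overlap_bboxes (bbox_list1 : List (Int × Int × Int × Int)) (bbox_list2 : List (Int × Int × Int × Int)) : List (Int × Int) :=
  (PySem.List.enumerate bbox_list1).foldl (fun overlap_list p =>
    (PySem.List.enumerate bbox_list2).foldl (fun acc q =>
      if p.2.1 ≤ q.2.2.2.1 ∧ p.2.2.2.1 ≥ q.2.1 ∧ p.2.2.1 ≤ q.2.2.2.2 ∧ p.2.2.2.2 ≥ q.2.2.1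
      then acc ++ [(p.1, q.1)] else acc) overlap_list) []

-- ===== PORT B =====
-- inner loop of Source B: scan the x1-sorted indexed list, break once a1 > x2, collect matching indices
def pvAltScan (x1 y1 x2 y2 : Int) : List (Int × (Int × Int × Int × Int)) → List Int
  | [] => []
  | q :: rest =>
    if q.2.1 > x2 then []
    else if x1 ≤ q.2.2.2.1 ∧ y1 ≤ q.2.2.2.2 ∧ y2 ≥ q.2.2.1
      then q.1 :: pvAltScan x1 y1 x2 y2 rest
      else pvAltScan x1 y1 x2 y2 rest

def naive_overlap_bboxes_alt (bbox_list1 : List (Int × Int × Int × Int)) (bbox_list2 : List (Int × Int × Int × Int)) : List (Int × Int) :=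
  let indexed2 := PySem.List.sorted (PySem.List.enumerate bbox_list2) (fun t => t.2.1) false
  (PySem.List.enumerate bbox_list1).foldl (fun out p =>
    let js := PySem.List.sorted (pvAltScan p.2.1 p.2.2.1 p.2.2.2.1 p.2.2.2.2 indexed2) (fun x => x) false
    out ++ js.map (fun j => (p.1, j))) []

-- ===== PRECONDITION & SPEC =====
def Spec_naive_overlap_bboxes (bbox_list1 : List (Int × Int × Int × Int)) (bbox_list2 : List (Int × Int × Int × Int)) (out : List (Int × Int)) : Prop := out = naive_overlap_bboxes_alt bbox_list1 bbox_list2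
instance (bbox_list1 : List (Int × Int × Int × Int)) (bbox_list2 : List (Int × Int × Int × Int)) (out : List (Int × Int)) : Decidable (Spec_naive_overlap_bboxes bbox_list1 bbox_list2 out) := by unfold Spec_naive_overlap_bboxes; infer_instance

-- ===== CLAIM (what is proved, stated in full; the proofs are below) =====
def Claim_equal_naive_overlap_bboxes : Prop := ∀ (bbox_list1 : List (Int × Int × Int × Int)) (bbox_list2 : List (Int × Int × Int × Int)), Dom_naive_overlap_bboxes bbox_list1 bbox_list2 → Spec_naive_overlap_bboxes bbox_list1 bbox_list2 (naive_overlap_bboxes bbox_list1 bbox_list2)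

-- ===== LEMMAS AND PROOFS =====

-- A's overlap test for a fixed first-list entry p against a second-list entry q
def pvCond (p q : Int × (Int × Int × Int × Int)) : Bool :=
  decide (p.2.1 ≤ q.2.2.2.1 ∧ p.2.2.2.1 ≥ q.2.1 ∧ p.2.2.1 ≤ q.2.2.2.2 ∧ p.2.2.2.2 ≥ q.2.2.1)

-- on a list sorted by a1, the break-scan equals the filter of A's condition
lemma pvAltScan_eq_filter (p : Int × (Int × Int × Int × Int))
    (L : List (Int × (Int × Int × Int × Int)))
    (hs : L.Pairwise (fun a b => a.2.1 ≤ b.2.1)) :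
    pvAltScan p.2.1 p.2.2.1 p.2.2.2.1 p.2.2.2.2 L
      = (L.filter (fun q => pvCond p q)).map (fun q => q.1) := by
  induction L with
  | nil => simp [pvAltScan]
  | cons q rest ih =>
    rcases List.pairwise_cons.mp hs with ⟨hq, hrest⟩
    by_cases hb : q.2.1 > p.2.2.2.1
    · have hfilter : (q :: rest).filter (fun r => pvCond p r) = [] := by
        rw [List.filter_eq_nil_iff]
        intro r hr
        rcases List.mem_cons.mp hr with h | h
        · subst h; simp only [pvCond, decide_eq_true_eq]; intro hc; omega
        · have := hq r h
          simp only [pvCond, decide_eq_true_eq]; intro hc; omega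
      rw [hfilter]
      simp [pvAltScan, hb]
    · rw [not_lt] at hb
      by_cases hc : p.2.1 ≤ q.2.2.2.1 ∧ p.2.2.1 ≤ q.2.2.2.2 ∧ p.2.2.2.2 ≥ q.2.2.1
      · have hcond : pvCond p q = true := by
          simp only [pvCond, decide_eq_true_eq]; exact ⟨hc.1, hb, hc.2.1, hc.2.2⟩
        simp only [pvAltScan, if_neg (not_lt.mpr hb), if_pos hc]
        rw [ih hrest]
        simp [hcond]
      · have hcond : ¬ pvCond p q = true := by
          simp only [pvCond, decide_eq_true_eq]; intro h; exact hc ⟨h.1, h.2.2.1, h.2.2.2⟩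
        simp only [pvAltScan, if_neg (not_lt.mpr hb), if_neg hc]
        rw [ih hrest]
        simp [hcond]

-- per first-list entry, B's sorted scan result equals the index list A's filter produces
lemma pv_js_eq (p : Int × (Int × Int × Int × Int)) (l2 : List (Int × Int × Int × Int)) :
    PySem.List.sorted
      (pvAltScan p.2.1 p.2.2.1 p.2.2.2.1 p.2.2.2.2
        (PySem.List.sorted (PySem.List.enumerate l2) (fun t => t.2.1) false))
      (fun x => x) false
    = ((PySem.List.enumerate l2).filter (fun q => pvCond p q)).map (fun q => q.1) := by
  have hs : (PySem.List.sorted (PySem.List.enumerate l2) (fun t => t.2.1) false).Pairwise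
      (fun a b => a.2.1 ≤ b.2.1) :=
    PySem.List.sorted_pairwise (PySem.List.enumerate l2) (fun t => t.2.1)
  rw [pvAltScan_eq_filter p _ hs]
  apply PySem.List.sorted_eq_of_perm_of_pairwise_lt
  · exact (((PySem.List.sorted_perm (PySem.List.enumerate l2) (fun t => t.2.1) false).filter _).map _).symm
  · have henum : (PySem.List.enumerate l2 (0:Int)).Pairwise (fun a b => a.1 < b.1) :=
      PySem.List.pairwise_lt_enumerate l2 0
    exact (henum.filter _).map _ (fun a b h => h)

-- ===== VERDICT (by name: the statement is the Claim_ definition above) =====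
theorem naive_overlap_bboxes_spec : Claim_equal_naive_overlap_bboxes := by
  intro l1 l2 _
  unfold Spec_naive_overlap_bboxes naive_overlap_bboxes naive_overlap_bboxes_alt
  have inner : ∀ (acc : List (Int × Int)) (p : Int × (Int × Int × Int × Int)),
      (PySem.List.enumerate l2).foldl (fun acc2 q =>
        if p.2.1 ≤ q.2.2.2.1 ∧ p.2.2.2.1 ≥ q.2.1 ∧ p.2.2.1 ≤ q.2.2.2.2 ∧ p.2.2.2.2 ≥ q.2.2.1
        then acc2 ++ [(p.1, q.1)] else acc2) acc
      = acc ++ ((PySem.List.enumerate l2).filter (fun q => pvCond p q)).map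
          (fun q => (p.1, q.1)) := by
    intro acc p
    have h := PySem.List.foldl_append_ite (l := PySem.List.enumerate l2)
      (p := fun q => pvCond p q) (f := fun q => (p.1, q.1)) (acc := acc)
    simpa [pvCond] using h
  simp only [inner, PySem.List.foldl_append_eq_flatMap, List.nil_append]
  apply List.flatMap_congr
  intro p _
  rw [pv_js_eq p l2, List.map_map]
  rfl
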